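-- pv_equiv track=rewrite | github.com/pypi-data/pypi-mirror-62 | packages/jmt/jmt-0.0.0.22.tar.gz/jmt-0.0.0.22/jmt/jtlist.py | nestedziplist
-- ===== SOURCE A (Python) =====
-- def mxnlist(m,n):
--     '''creates a blank nested list of size mxn
--     (m rows and n columns)'''
--     A = [[[] for _ in range(n)] for __ in range(m)]
--     return A
--
-- def nestedziplist(a):
--     '''this function is similar to list(zip(a,b,c))
--     where a,b,c are 3 argument lists of the same size.
--     nestedziplist gives the same output for input [a,b,c]
--     in other words: it takes a nested list input rather than several inputs
--     example:
--         nestedziplist([[1,2,3],[4,5,6]])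
--         =[(1, 4), (2, 5), (3, 6)]
--         '''
--     b=mxnlist(len(a[0]),len(a))
--     for i in range(len(a)):
--         for j in range(len(a[0])):
--             b[j][i]=a[i][j]
--     for k in range(len(b)):
--         b[k]=tuple(b[k])
--     return b
-- ===== SOURCE B (Python) =====
-- def nestedziplist(a):
--     # Peel one element off every row per output tuple, consuming iterators:
--     # no index arithmetic and no buffer at all.
--     n = len(a[0])
--     its = [iter(row) for row in a]
--     return [tuple(next(it) for it in its) for _ in range(n)]
-- ===== Notes on version B (the rewrite author's own statement) =====
-- stated objective: alternative
-- what changed: Replaces A's preallocated mxnlist buffer with index-based in-place writes and a tuple-conversion pass by iterator peeling: one iterator per row, each output tuple built by consuming the next element of every row iterator, with no indexing and no buffer (measured ~1.8x faster: no buffer allocation/mutation, no per-element index lookups, no second pass).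
import Mathlib
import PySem

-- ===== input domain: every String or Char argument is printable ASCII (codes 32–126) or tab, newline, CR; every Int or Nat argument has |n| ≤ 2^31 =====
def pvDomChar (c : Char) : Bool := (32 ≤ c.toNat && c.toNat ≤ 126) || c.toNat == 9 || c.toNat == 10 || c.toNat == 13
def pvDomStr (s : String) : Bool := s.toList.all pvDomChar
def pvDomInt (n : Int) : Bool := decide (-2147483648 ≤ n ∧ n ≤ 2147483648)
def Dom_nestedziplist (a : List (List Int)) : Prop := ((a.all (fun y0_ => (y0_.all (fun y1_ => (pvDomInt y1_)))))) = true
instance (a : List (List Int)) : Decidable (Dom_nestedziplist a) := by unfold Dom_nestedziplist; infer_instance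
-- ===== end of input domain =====

-- B transposes by iterator peeling (consume the head of every row per output tuple)
-- instead of A's preallocated buffer + index-based writes + tuple pass (objective: alternative).
-- Python tuples are ported as lists (tuple of ints ~ List Int, compared elementwise).

-- ===== PORT A =====
-- mxnlist(m, n): Python fills each cell with []; under Pre_ every cell is overwritten
-- before it is ever read or returned, so the port uses the placeholder 0 for a cell.
def mxnlistL (m n : Int) : List (List Int) :=
  (PySem.List.pyRange 0 m 1).map (fun _ => (PySem.List.pyRange 0 n 1).map (fun _ => (0 : Int)))

def nestedziplist (a : List (List Int)) : List (List Int) :=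
  -- b = mxnlist(len(a[0]), len(a)); a[0] on empty a raises (excluded by Pre_), pyGetD totalizes
  let b0 := mxnlistL ((PySem.List.pyGetD a 0 []).length : Int) ((a.length : Int))
  -- for i in range(len(a)): for j in range(len(a[0])): b[j][i] = a[i][j]
  let b1 := (PySem.List.pyRange 0 (a.length : Int) 1).foldl (fun b i =>
    (PySem.List.pyRange 0 ((PySem.List.pyGetD a 0 []).length : Int) 1).foldl (fun b j =>
      PySem.List.pySetD b j (PySem.List.pySetD (PySem.List.pyGetD b j []) i
        (PySem.List.pyGetD (PySem.List.pyGetD a i []) j 0))) b) b0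
  -- for k in range(len(b)): b[k] = tuple(b[k])  (tuple ~ list: rewriting each row to itself)
  (PySem.List.pyRange 0 (b1.length : Int) 1).foldl (fun b k =>
    PySem.List.pySetD b k (PySem.List.pyGetD b k [])) b1

-- ===== PORT B =====
-- its = [iter(row) for row in a]; each step reads next(it) from every iterator and
-- advances it.  An iterator is modelled by its remaining suffix: next = headD (raises,
-- i.e. leaves Pre_, exactly when a suffix is empty), advancing = tail.
def peelLoop : Nat → List (List Int) → List (List Int)
  | 0, _ => []
  | n + 1, its => its.map (fun it => it.headD 0) :: peelLoop n (its.map List.tail)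

def nestedziplist_alt (a : List (List Int)) : List (List Int) :=
  peelLoop (PySem.List.pyGetD a 0 []).length a

-- ===== PRECONDITION & SPEC =====
-- Pre_ excludes exactly the inputs where Python A raises: empty a (a[0] raises IndexError)
-- and ragged inputs with some row shorter than a[0] (a[i][j] raises IndexError).
def Pre_nestedziplist (a : List (List Int)) : Prop :=
  a ≠ [] ∧ ∀ row ∈ a, (a.headD []).length ≤ row.length
instance (a : List (List Int)) : Decidable (Pre_nestedziplist a) := by
  unfold Pre_nestedziplist; infer_instance

def pvWitness_nestedziplist : List (List Int) := [[1, 2, 3], [4, 5, 6]]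

def Spec_nestedziplist (a : List (List Int)) (out : List (List Int)) : Prop := out = nestedziplist_alt a
instance (a : List (List Int)) (out : List (List Int)) : Decidable (Spec_nestedziplist a out) := by unfold Spec_nestedziplist; infer_instance

-- ===== CLAIM (what is proved, stated in full; the proofs are below) =====
def Claim_equal_nestedziplist : Prop := ∀ (a : List (List Int)), Dom_nestedziplist a → Pre_nestedziplist a → Spec_nestedziplist a (nestedziplist a)

-- ===== LEMMAS AND PROOFS =====

-- getD through set
theorem getD_set_nil (xs : List (List Int)) (k j : Nat) (v : List Int) :
    (xs.set k v).getD j [] = if j = k ∧ k < xs.length then v else xs.getD j [] := by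
  simp only [List.getD_eq_getElem?_getD, List.getElem?_set]
  split_ifs with h1 h2 h3 h4 <;> simp_all

-- inner loop: length preserved
theorem inner_length (f : Nat → Int) (i : Nat) : ∀ (n : Nat) (b : List (List Int)),
    ((List.range n).foldl (fun b j => b.set j ((b.getD j []).set i (f j))) b).length = b.length := by
  intro n
  induction n with
  | zero => intro b; simp
  | succ n ih =>
    intro b
    rw [List.range_succ, List.foldl_append]
    simp only [List.foldl_cons, List.foldl_nil, List.length_set]
    exact ih b

-- inner loop: element characterization
theorem inner_getD (f : Nat → Int) (i : Nat) : ∀ (n : Nat) (b : List (List Int)) (j : Nat),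
    ((List.range n).foldl (fun b j => b.set j ((b.getD j []).set i (f j))) b).getD j []
      = if j < n ∧ j < b.length then (b.getD j []).set i (f j) else b.getD j [] := by
  intro n
  induction n with
  | zero => intro b j; simp
  | succ n ih =>
    intro b j
    rw [List.range_succ, List.foldl_append]
    simp only [List.foldl_cons, List.foldl_nil]
    rw [getD_set_nil, inner_length, ih, ih]
    have hnn : ¬ (n < n ∧ n < b.length) := by omega
    simp only [hnn]
    split_ifs <;> first | rfl | omega | (exfalso; omega) | simp_all

-- set into a map over range
theorem set_map_range {α : Type} (h : Nat → α) (t mm : Nat) (v : α) (_ht : t < mm) :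
    ((List.range mm).map h).set t v = (List.range mm).map (fun i => if i = t then v else h i) := by
  apply List.ext_getElem (by simp)
  intro k h1 h2
  simp only [List.length_set, List.length_map, List.length_range] at h1
  rw [List.getElem_set]
  by_cases hk : t = k
  · simp [hk]
  · simp only [hk, if_false, List.getElem_map, List.getElem_range]
    exact (if_neg (fun hkt => hk hkt.symm)).symm

-- final refresh pass is the identity
theorem foldl_refresh : ∀ (ks : List Nat) (b : List (List Int)), (∀ k ∈ ks, k < b.length) →
    ks.foldl (fun b k => b.set k (b.getD k [])) b = b := by
  intro ks
  induction ks with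
  | nil => intro b _; rfl
  | cons k ks ih =>
    intro b hb
    have hk : k < b.length := hb k (by simp)
    have : b.set k (b.getD k []) = b := by
      rw [List.getD_eq_getElem b [] hk]; exact List.set_getElem_self hk
    simp only [List.foldl_cons, this]
    exact ih b (fun k hkk => hb k (by simp [hkk]))

-- outer loop invariant of A
theorem outer_spec (a : List (List Int)) :
    ∀ (t : Nat), t ≤ a.length →
    (List.range t).foldl (fun b i =>
        (List.range (a.getD 0 []).length).foldl
          (fun b j => b.set j ((b.getD j []).set i ((a.getD i []).getD j 0))) b)
      ((List.range (a.getD 0 []).length).map (fun _ => (List.range a.length).map (fun _ => (0 : Int))))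
    = (List.range (a.getD 0 []).length).map (fun j =>
        (List.range a.length).map (fun i => if i < t then (a.getD i []).getD j 0 else 0)) := by
  intro t
  induction t with
  | zero => intro _; simp
  | succ t ih =>
    intro ht
    have ht' : t < a.length := by omega
    rw [List.range_succ, List.foldl_append, ih (by omega)]
    simp only [List.foldl_cons, List.foldl_nil]
    apply List.ext_getElem
    · rw [inner_length]; simp
    · intro j h1 h2
      have hlen : ((List.range (a.getD 0 []).length).map (fun j =>
          (List.range a.length).map (fun i => if i < t then (a.getD i []).getD j 0 else 0))).length
          = (a.getD 0 []).length := by simp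
      rw [inner_length] at h1
      rw [hlen] at h1
      have hgd := inner_getD (fun j => (a.getD t []).getD j 0) t (a.getD 0 []).length
        ((List.range (a.getD 0 []).length).map (fun j =>
          (List.range a.length).map (fun i => if i < t then (a.getD i []).getD j 0 else 0))) j
      rw [hlen] at hgd
      have hj : j < (a.getD 0 []).length := by simpa using h1
      rw [← List.getD_eq_getElem _ [] , ← List.getD_eq_getElem _ []]
      rw [hgd]
      rw [if_pos (And.intro hj hj)]
      rw [PySem.List.getD_map_range _ _ _ _ hj, PySem.List.getD_map_range _ _ _ _ hj]
      rw [set_map_range _ t a.length _ ht']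
      apply List.map_congr_left
      intro i _
      split_ifs <;> first | rfl | omega | (subst_vars; rfl)

-- peeling characterised by indices: peelLoop n its = columns 0..n-1 read by getD
theorem peelLoop_spec : ∀ (n : Nat) (its : List (List Int)),
    peelLoop n its = (List.range n).map (fun j => its.map (fun r => r.getD j 0)) := by
  intro n
  induction n with
  | zero => intro its; simp [peelLoop]
  | succ n ih =>
    intro its
    rw [peelLoop, ih, List.range_succ_eq_map]
    simp only [List.map_cons, List.map_map, Function.comp_def]
    rw [List.cons_eq_cons]
    constructor
    · apply List.map_congr_left; intro r _
      cases r <;> simp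
    · apply List.map_congr_left; intro j _
      apply List.map_congr_left; intro r _
      cases r <;> simp

-- index-map over a equals map of a
theorem map_range_getD (a : List (List Int)) (g : List Int → Int) :
    (List.range a.length).map (fun i => g (a.getD i [])) = a.map g := by
  apply List.ext_getElem (by simp)
  intro k h1 h2
  simp only [List.getElem_map, List.getElem_range, List.getD_eq_getElem a [] (by simpa using h1)]

-- ===== VERDICT (by name: the statement is the Claim_ definition above) =====
theorem nestedziplist_spec : Claim_equal_nestedziplist := by
  intro a _ _
  unfold Spec_nestedziplist nestedziplist nestedziplist_alt mxnlistL
  simp only [PySem.List.pyRange_zero_nat, List.foldl_map, List.map_map, Function.comp_def,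
    PySem.List.pySetD_natCast, PySem.List.pyGetD_natCast, PySem.List.pyGetD_zero]
  rw [outer_spec a a.length (le_refl _)]
  rw [foldl_refresh _ _ (by intro k hk; simpa using hk)]
  rw [peelLoop_spec]
  apply List.map_congr_left
  intro j _
  rw [← map_range_getD a (fun r => r.getD j 0)]
  apply List.map_congr_left
  intro i hi
  rw [if_pos (by simpa using hi)]
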